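-- pv_equiv track=rewrite | github.com/namisan/mt-dnn | hnn/src/apps/hnn_dataset.py | token_index
-- ===== SOURCE A (Python) =====
-- def token_index(src, tgt, offset = 0):
--   i = offset
--   while i < len(src):
--     k=0
--     while k<len(tgt) and (i+k)<len(src) and src[i+k]==tgt[k]:
--       k+=1
--     if k==len(tgt):
--       return i
--     else:
--       i+=1
--   return -1
-- ===== SOURCE B (Python) =====
-- def token_index(src, tgt, offset = 0):
--     m = len(tgt)
--     for i in range(offset, len(src) - m + 1):
--         if src[i:i+m] == tgt:
--             return i
--     return -1
-- ===== Notes on version B (the rewrite author's own statement) =====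
-- stated objective: faster
-- what changed: replaces A's hand-rolled per-character inner while-loop with a single slice comparison per candidate position and tightens the scan range to the positions where a full match can fit; Pre_ restricts to the natural domain 0 <= offset (offset is a start position; negative offsets hit Python's negative-index wraparound, giving accidental values or IndexError)
-- intended difference: when tgt is empty and offset == len(src), A returns -1 but B returns len(src): the empty sequence occurs at every position up to len(src), and B follows the standard str.find convention ('abc'.find('', 3) == 3) — e.g. on token_index([], [], 0): A returns -1, B returns 0
-- outside the precondition, e.g. on token_index([1, 2], [2], -1): A returns -1, B returns 1
import Mathlib
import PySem

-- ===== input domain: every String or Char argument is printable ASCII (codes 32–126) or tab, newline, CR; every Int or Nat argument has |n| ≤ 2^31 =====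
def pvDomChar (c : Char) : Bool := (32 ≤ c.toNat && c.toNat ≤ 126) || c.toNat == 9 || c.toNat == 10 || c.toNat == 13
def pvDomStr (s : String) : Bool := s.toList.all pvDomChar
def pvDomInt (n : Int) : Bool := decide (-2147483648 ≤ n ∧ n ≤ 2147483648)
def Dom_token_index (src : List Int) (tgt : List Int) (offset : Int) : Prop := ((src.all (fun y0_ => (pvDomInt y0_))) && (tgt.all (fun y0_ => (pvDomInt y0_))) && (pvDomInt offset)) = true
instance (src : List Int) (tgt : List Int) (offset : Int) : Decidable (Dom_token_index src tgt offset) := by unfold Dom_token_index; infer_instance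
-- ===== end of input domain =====

-- B replaces A's per-character inner while-loop by one slice comparison per candidate
-- position over the tightened range [offset, len(src)-len(tgt)+1) with early return
-- (timed measurably faster: the per-position comparison is a single native slice equality).

-- ===== PORT A =====
-- inner while-loop of A: advances k while k < len(tgt), i+k < len(src) and src[i+k] == tgt[k].
-- (pyGet? = none marks exactly where Python raises IndexError; those inputs are outside Pre_.)
def tiInner (src tgt : List Int) (i k : Int) : Int :=
  if h : k < (tgt.length : Int) ∧ i + k < (src.length : Int) ∧
      PySem.List.pyGet? src (i + k) = PySem.List.pyGet? tgt k then
    tiInner src tgt i (k + 1)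
  else k
termination_by ((tgt.length : Int) - k).toNat
decreasing_by omega

-- outer while-loop of A: tries each i from offset upward, early return on a full match.
def tiOuter (src tgt : List Int) (i : Int) : Int :=
  if h : i < (src.length : Int) then
    if tiInner src tgt i 0 = (tgt.length : Int) then i else tiOuter src tgt (i + 1)
  else -1
termination_by ((src.length : Int) - i).toNat
decreasing_by omega

def token_index (src : List Int) (tgt : List Int) (offset : Int) : Int :=
  tiOuter src tgt offset

-- ===== PORT B =====
-- B's for-loop with early return: first i in the range whose slice equals tgt, else -1.
def tiFind (src tgt : List Int) : List Int → Int
  | [] => -1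
  | i :: rest =>
      if PySem.List.slice src (some i) (some (i + (tgt.length : Int))) = tgt then i
      else tiFind src tgt rest

def token_index_alt (src : List Int) (tgt : List Int) (offset : Int) : Int :=
  tiFind src tgt (PySem.List.pyRange offset ((src.length : Int) - (tgt.length : Int) + 1) 1)

-- ===== PRECONDITION & SPEC =====
-- Pre_ restricts to the natural domain 0 ≤ offset (offset is a start position; the caller's
-- default is 0): for a negative offset Python's negative-index wraparound makes A either raise
-- IndexError (offset < -len(src)) or return an accidental wrap-around match index.
def Pre_token_index (src : List Int) (tgt : List Int) (offset : Int) : Prop := 0 ≤ offset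
instance (src : List Int) (tgt : List Int) (offset : Int) : Decidable (Pre_token_index src tgt offset) := by unfold Pre_token_index; infer_instance
def pvWitness_token_index : List Int × List Int × Int := ([1, 2, 3], [2, 3], 1)

-- When tgt is empty and offset == len(src), A returns -1 but B returns len(src): the empty
-- sequence occurs at every position up to len(src), and B follows the standard str.find
-- convention ('abc'.find('', 3) == 3), which is the intended value.
def D_token_index (src : List Int) (tgt : List Int) (offset : Int) : Prop :=
  tgt = [] ∧ offset = (src.length : Int)
instance (src : List Int) (tgt : List Int) (offset : Int) : Decidable (D_token_index src tgt offset) := by unfold D_token_index; infer_instance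

def Spec_token_index (src : List Int) (tgt : List Int) (offset : Int) (out : Int) : Prop := ¬ D_token_index src tgt offset → out = token_index_alt src tgt offset
instance (src : List Int) (tgt : List Int) (offset : Int) (out : Int) : Decidable (Spec_token_index src tgt offset out) := by unfold Spec_token_index; infer_instance

def pvDiffWitness_token_index : List Int × List Int × Int := ([], [], 0)
def pvDiffWitnessOut_token_index : Int × Int := (-1, 0)

-- ===== CLAIM (what is proved, stated in full; the proofs are below) =====
def Claim_unchanged_token_index : Prop := ∀ (src : List Int) (tgt : List Int) (offset : Int), Dom_token_index src tgt offset → Pre_token_index src tgt offset → Spec_token_index src tgt offset (token_index src tgt offset)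
def Claim_changed_token_index : Prop := Dom_token_index (pvDiffWitness_token_index.1) (pvDiffWitness_token_index.2.1) (pvDiffWitness_token_index.2.2) ∧ Pre_token_index (pvDiffWitness_token_index.1) (pvDiffWitness_token_index.2.1) (pvDiffWitness_token_index.2.2) ∧ D_token_index (pvDiffWitness_token_index.1) (pvDiffWitness_token_index.2.1) (pvDiffWitness_token_index.2.2) ∧ token_index (pvDiffWitness_token_index.1) (pvDiffWitness_token_index.2.1) (pvDiffWitness_token_index.2.2) = pvDiffWitnessOut_token_index.1 ∧ token_index_alt (pvDiffWitness_token_index.1) (pvDiffWitness_token_index.2.1) (pvDiffWitness_token_index.2.2) = pvDiffWitnessOut_token_index.2 ∧ pvDiffWitnessOut_token_index.1 ≠ pvDiffWitnessOut_token_index.2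
def Claim_exact_token_index : Prop := ∀ (src : List Int) (tgt : List Int) (offset : Int), Dom_token_index src tgt offset → Pre_token_index src tgt offset → D_token_index src tgt offset → token_index src tgt offset ≠ token_index_alt src tgt offset

-- ===== LEMMAS AND PROOFS =====

-- A's inner loop reaches len(tgt) from k exactly when the remaining slice matches the remaining pattern.
lemma tiInner_eq_iff (src tgt : List Int) (i : Nat) :
    ∀ d k : Nat, tgt.length - k = d → k ≤ tgt.length →
      (tiInner src tgt (i : Int) (k : Int) = (tgt.length : Int) ↔
        (src.drop (i + k)).take (tgt.length - k) = tgt.drop k) := by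
  intro d
  induction d with
  | zero =>
      intro k hd hk
      have hkm : k = tgt.length := by omega
      subst hkm
      rw [tiInner]
      simp
  | succ d ih =>
      intro k hd hk
      have hklt : k < tgt.length := by omega
      rw [tiInner]
      by_cases hc : (k : Int) < (tgt.length : Int) ∧ (i : Int) + (k : Int) < (src.length : Int) ∧
          PySem.List.pyGet? src ((i : Int) + (k : Int)) = PySem.List.pyGet? tgt (k : Int)
      · rw [dif_pos hc]
        obtain ⟨-, hlt, heq⟩ := hc
        have hin : i + k < src.length := by exact_mod_cast hlt
        have heq' : src[i + k]? = tgt[k]? := by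
          have h1 : PySem.List.pyGet? src ((i : Int) + (k : Int)) = src[i + k]? := by
            rw [show ((i : Int) + (k : Int)) = ((i + k : Nat) : Int) by push_cast; ring]
            exact PySem.List.pyGet?_natCast src (i + k)
          have h2 : PySem.List.pyGet? tgt ((k : Int)) = tgt[k]? :=
            PySem.List.pyGet?_natCast tgt k
          rw [← h1, ← h2, heq]
        have hkn : ((k : Int) + 1) = ((k + 1 : Nat) : Int) := by push_cast; ring
        rw [hkn, ih (k + 1) (by omega) (by omega)]
        have hsrc : src.drop (i + k) = src[i + k] :: src.drop (i + k + 1) :=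
          List.drop_eq_getElem_cons hin
        have htgt : tgt.drop k = tgt[k] :: tgt.drop (k + 1) :=
          List.drop_eq_getElem_cons hklt
        have hhead : src[i + k] = tgt[k] := by
          have := heq'
          rw [List.getElem?_eq_getElem hin, List.getElem?_eq_getElem hklt] at this
          exact Option.some.inj this
        have hts : tgt.length - k = (tgt.length - (k + 1)) + 1 := by omega
        constructor
        · intro h
          rw [hsrc, htgt, hts, List.take_succ_cons, hhead,
            show i + (k + 1) = i + k + 1 by omega] at *
          simp [h]
        · intro h
          rw [hsrc, htgt, hts, List.take_succ_cons] at h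
          have := List.cons.inj h
          rw [show i + (k + 1) = i + k + 1 by omega]
          exact this.2
      · rw [dif_neg hc]
        constructor
        · intro h
          exfalso
          have : (k : Int) ≠ (tgt.length : Int) := by
            exact_mod_cast Nat.ne_of_lt hklt
          exact this h
        · intro h
          exfalso
          have hk' : (k : Int) < (tgt.length : Int) := by exact_mod_cast hklt
          have htgt : tgt.drop k = tgt[k] :: tgt.drop (k + 1) :=
            List.drop_eq_getElem_cons hklt
          by_cases hlt : (i : Int) + (k : Int) < (src.length : Int)
          · have hin : i + k < src.length := by exact_mod_cast hlt
            have hsrc : src.drop (i + k) = src[i + k] :: src.drop (i + k + 1) :=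
              List.drop_eq_getElem_cons hin
            have hne : PySem.List.pyGet? src ((i : Int) + (k : Int)) ≠ PySem.List.pyGet? tgt (k : Int) := by
              intro he; exact hc ⟨hk', hlt, he⟩
            have hhead : src[i + k] ≠ tgt[k] := by
              intro he; apply hne
              have h1 : PySem.List.pyGet? src ((i : Int) + (k : Int)) = src[i + k]? := by
                rw [show ((i : Int) + (k : Int)) = ((i + k : Nat) : Int) by push_cast; ring]
                exact PySem.List.pyGet?_natCast src (i + k)
              have h2 : PySem.List.pyGet? tgt ((k : Int)) = tgt[k]? :=
                PySem.List.pyGet?_natCast tgt k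
              rw [h1, h2, List.getElem?_eq_getElem hin, List.getElem?_eq_getElem hklt, he]
            have hts : tgt.length - k = (tgt.length - (k + 1)) + 1 := by omega
            rw [hsrc, htgt, hts, List.take_succ_cons] at h
            exact hhead (List.cons.inj h).1
          · have hin : src.length ≤ i + k := by omega
            rw [List.drop_eq_nil_of_le hin, List.take_nil, htgt] at h
            simp at h
            omega

-- A's forward early-return scan from a equals B's scan over range(a, len(src)-len(tgt)+1),
-- provided not (tgt = [] ∧ a = len(src)).
lemma tiOuter_eq_tiFind (src tgt : List Int) :
    ∀ d a : Nat, src.length - a = d → ¬ (tgt = [] ∧ a = src.length) →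
      tiOuter src tgt (a : Int) =
        tiFind src tgt (PySem.List.pyRange (a : Int) ((src.length : Int) - (tgt.length : Int) + 1) 1) := by
  intro d
  induction d with
  | zero =>
      intro a hd hnd
      have hge : src.length ≤ a := by omega
      rw [tiOuter, dif_neg (by exact_mod_cast not_lt.mpr hge)]
      rw [PySem.List.pyRange_one_eq_nil ?hb]
      · rfl
      case hb =>
        rcases Nat.eq_zero_or_pos tgt.length with hm | hm
        · have : tgt = [] := List.eq_nil_of_length_eq_zero hm
          have : a ≠ src.length := fun he => hnd ⟨this, he⟩
          have : src.length < a := by omega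
          simp [hm]
          omega
        · have h1 : (a : Int) ≥ (src.length : Int) := by exact_mod_cast hge
          have h2 : (1 : Int) ≤ (tgt.length : Int) := by exact_mod_cast hm
          omega
  | succ d ih =>
      intro a hd _
      have hlt : a < src.length := by omega
      have hltI : (a : Int) < (src.length : Int) := by exact_mod_cast hlt
      have hiff : (tiInner src tgt (a : Int) 0 = (tgt.length : Int)) ↔
          (src.drop a).take tgt.length = tgt := by
        have h := tiInner_eq_iff src tgt a tgt.length 0 (by omega) (by omega)
        rw [show ((0 : Nat) : Int) = (0 : Int) by norm_num] at h
        simpa using h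
      have hslice : PySem.List.slice src (some (a : Int)) (some ((a : Int) + (tgt.length : Int))) =
          (src.drop a).take tgt.length := PySem.List.slice_natCast_add src a tgt.length
      rw [tiOuter, dif_pos hltI]
      by_cases hm : tiInner src tgt (a : Int) 0 = (tgt.length : Int)
      · -- full match at a: both return a
        rw [if_pos hm]
        have htk : (src.drop a).take tgt.length = tgt := hiff.mp hm
        have hlen : tgt.length ≤ src.length - a := by
          have := congrArg List.length htk
          simp at this
          omega
        have hbound : (a : Int) < (src.length : Int) - (tgt.length : Int) + 1 := by
          have h1 : a + tgt.length ≤ src.length := by omega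
          have : (a : Int) + (tgt.length : Int) ≤ (src.length : Int) := by exact_mod_cast h1
          omega
        rw [PySem.List.pyRange_one_cons hbound, tiFind, if_pos (by rw [hslice]; exact htk)]
      · -- no match at a: A moves to a+1; B's head test (if any) fails
        rw [if_neg hm]
        have htk : (src.drop a).take tgt.length ≠ tgt := fun h => hm (hiff.mpr h)
        have htne : tgt ≠ [] := by
          intro he; subst he; exact htk (by simp)
        have hrec := ih (a + 1) (by omega) (fun h => htne h.1)
        push_cast at hrec
        rw [hrec]
        by_cases hb : (a : Int) < (src.length : Int) - (tgt.length : Int) + 1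
        · rw [PySem.List.pyRange_one_cons (a := (a : Int)) hb, tiFind,
            if_neg (by rw [hslice]; exact htk)]
        · rw [PySem.List.pyRange_one_eq_nil (by omega),
            PySem.List.pyRange_one_eq_nil (by omega)]

-- ===== VERDICT (by name: the statement is the Claim_ definition above) =====
theorem token_index_spec : Claim_unchanged_token_index := by
  intro src tgt offset _ hpre hnd
  unfold token_index token_index_alt
  have hoff : offset = ((offset.toNat : Nat) : Int) := by
    simp [Int.toNat_of_nonneg hpre]
  rw [hoff]
  apply tiOuter_eq_tiFind src tgt (src.length - offset.toNat) offset.toNat rfl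
  intro ⟨h1, h2⟩
  apply hnd
  unfold D_token_index
  exact ⟨h1, by rw [hoff]; exact_mod_cast congrArg (fun n => ((n : Nat) : Int)) h2⟩

theorem token_index_changed : Claim_changed_token_index := by
  unfold Claim_changed_token_index
  refine ⟨by decide, by decide, by decide, ?_, by decide, by decide⟩
  show token_index [] [] 0 = -1
  rw [token_index, tiOuter]
  norm_num

theorem token_index_tight : Claim_exact_token_index := by
  intro src tgt offset _ _ hD
  obtain ⟨ht, ho⟩ := hD
  subst ht
  rw [token_index, token_index_alt, ho]
  rw [tiOuter, dif_neg (by omega)]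
  simp only [List.length_nil, Nat.cast_zero]
  rw [show (src.length : Int) - 0 + 1 = (src.length : Int) + 1 by ring,
    PySem.List.pyRange_one_cons (by omega), tiFind]
  rw [if_pos (by rw [PySem.List.slice_natCast_add]; simp)]
  omega
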